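-- pv_equiv track=rewrite | github.com/racrigler44/Rummikub | validation_input_hand.py | validate_colornumber_input
-- ===== SOURCE A (Python) =====
-- def validate_colornumber_input(input_str):
--     valid_colors = {"r", "o", "blue", "black"}
--     valid_numbers = {str(i) for i in range(1, 14)}  # "1" to "13"
--
--     tokens = input_str.replace(',', ' ').split()
--
--     if len(tokens) == 0:
--         return False, "Input cannot be empty."
--
--     parsed_cards = []
--
--     for token in tokens:
--         matched = False
--         for color in valid_colors:
--             if token.startswith(color):
--                 num_part = token[len(color):]
--                 if num_part in valid_numbers:
--                     parsed_cards.append((color, num_part))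
--                     matched = True
--                     break
--         if not matched:
--             return False, f"Invalid format: '{token}'"
--
--     return True, "All entries are valid."
-- ===== SOURCE B (Python) =====
-- def validate_colornumber_input(input_str):
--     valid_cards = {color + str(num)
--                    for color in ("r", "o", "blue", "black")
--                    for num in range(1, 14)}
--
--     tokens = input_str.replace(',', ' ').split()
--
--     if not tokens:
--         return False, "Input cannot be empty."
--
--     for token in tokens:
--         if token not in valid_cards:
--             return False, f"Invalid format: '{token}'"
--
--     return True, "All entries are valid."
-- ===== Notes on version B (the rewrite author's own statement) =====
-- stated objective: simpler
-- what changed: Precomputes the 52 valid card strings once and tests each token by a single set membership, removing the inner color loop, the prefix/suffix dissection and the unused parsed_cards list.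
import Mathlib
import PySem

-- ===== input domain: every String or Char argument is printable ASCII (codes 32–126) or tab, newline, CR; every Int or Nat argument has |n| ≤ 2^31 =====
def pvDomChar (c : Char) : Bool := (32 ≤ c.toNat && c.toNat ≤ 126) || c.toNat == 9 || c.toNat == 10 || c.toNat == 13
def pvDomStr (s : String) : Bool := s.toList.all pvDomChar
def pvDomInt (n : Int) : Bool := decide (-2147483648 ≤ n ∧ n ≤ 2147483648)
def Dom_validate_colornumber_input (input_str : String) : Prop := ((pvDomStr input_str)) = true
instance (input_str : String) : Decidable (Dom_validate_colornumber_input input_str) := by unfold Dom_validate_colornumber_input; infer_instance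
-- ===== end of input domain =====

-- B replaces A's inner color loop (prefix test + suffix lookup per color) by one membership
-- test in a precomputed 52-entry set of valid card strings; objective: simpler.

-- ===== PORT A =====
-- valid_colors = {"r","o","blue","black"}  (the per-token result is independent of set order:
-- the four colors are mutually non-prefixing, so at most one can match)
def pvColorsA : PySem.Set String := PySem.Set.ofList ["r", "o", "blue", "black"]
-- valid_numbers = {str(i) for i in range(1, 14)}
def pvNumbersA : PySem.Set String := PySem.Set.ofList ((PySem.List.pyRange 1 14 1).map PySem.Int.toStr)

-- the inner 'for color in valid_colors' loop with its break / matched flag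
def pvMatchA (token : String) : List String → Bool
  | [] => false
  | color :: rest =>
    if PySem.Str.startswith token color then
      -- num_part = token[len(color):]
      if PySem.Set.contains pvNumbersA (PySem.Str.slice token (some (PySem.Str.len color)) none) then
        true   -- matched = True; break (parsed_cards never affects the result)
      else pvMatchA token rest
    else pvMatchA token rest

-- the outer 'for token in tokens' loop with its early return
def pvLoopA : List String → Bool × String
  | [] => (true, "All entries are valid.")
  | token :: rest =>
      if pvMatchA token pvColorsA then pvLoopA rest
      else (false, "Invalid format: '" ++ token ++ "'")

def validate_colornumber_input (input_str : String) : Bool × String :=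
  let tokens := PySem.Str.split₀ (PySem.Str.replace input_str "," " ")
  if tokens.length == 0 then (false, "Input cannot be empty.")
  else pvLoopA tokens

-- ===== PORT B =====
-- valid_cards = {color + str(num) for color in (...) for num in range(1, 14)}
def pvValidCards : PySem.Set String :=
  PySem.Set.ofList (["r", "o", "blue", "black"].flatMap
    (fun color => (PySem.List.pyRange 1 14 1).map (fun num => color ++ PySem.Int.toStr num)))

def pvLoopB : List String → Bool × String
  | [] => (true, "All entries are valid.")
  | token :: rest =>
      if !(PySem.Set.contains pvValidCards token) then (false, "Invalid format: '" ++ token ++ "'")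
      else pvLoopB rest

def validate_colornumber_input_alt (input_str : String) : Bool × String :=
  match PySem.Str.split₀ (PySem.Str.replace input_str "," " ") with
  | [] => (false, "Input cannot be empty.")
  | token :: rest => pvLoopB (token :: rest)

-- ===== PRECONDITION & SPEC =====
def Spec_validate_colornumber_input (input_str : String) (out : Bool × String) : Prop := out = validate_colornumber_input_alt input_str
instance (input_str : String) (out : Bool × String) : Decidable (Spec_validate_colornumber_input input_str out) := by unfold Spec_validate_colornumber_input; infer_instance

-- ===== CLAIM (what is proved, stated in full; the proofs are below) =====
def Claim_equal_validate_colornumber_input : Prop := ∀ (input_str : String), Dom_validate_colornumber_input input_str → Spec_validate_colornumber_input input_str (validate_colornumber_input input_str)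

-- ===== LEMMAS AND PROOFS =====

theorem pvMatchA_cons (t c : String) (cs : List String) :
    pvMatchA t (c :: cs) =
      ((PySem.Str.startswith t c &&
        PySem.Set.contains pvNumbersA (PySem.Str.slice t (some (PySem.Str.len c)) none)) ||
       pvMatchA t cs) := by
  simp only [pvMatchA]
  cases h1 : PySem.Str.startswith t c with
  | false => simp
  | true =>
    cases h2 : PySem.Set.contains pvNumbersA (PySem.Str.slice t (some (PySem.Str.len c)) none) <;> simp_all

-- one color's test in A equals "token is color ++ n for some n in the numbers list"
theorem pvColor_iff (t c : String) :
    ((PySem.Str.startswith t c &&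
      PySem.Set.contains pvNumbersA (PySem.Str.slice t (some (PySem.Str.len c)) none)) = true)
    ↔ ∃ n ∈ (PySem.List.pyRange 1 14 1).map PySem.Int.toStr, t = c ++ n := by
  constructor
  · intro h
    rw [Bool.and_eq_true] at h
    obtain ⟨h1, h2⟩ := h
    have hpre : c.toList <+: t.toList := by
      rw [PySem.Str.startswith_eq] at h1; exact (PySem.Chars.startswith_iff _ _).mp h1
    have hmem : PySem.Str.slice t (some (PySem.Str.len c)) none ∈ pvNumbersA := by
      simpa [PySem.Set.contains] using h2
    refine ⟨_, (PySem.Set.mem_ofList _ _).mp hmem, ?_⟩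
    apply String.toList_inj.mp
    obtain ⟨u, hu⟩ := hpre
    have hsl : (PySem.Str.slice t (some (PySem.Str.len c)) none).toList = t.toList.drop c.length := by
      simp [PySem.Str.len, PySem.List.slice_from_natCast]
    simp [← hu]
  · rintro ⟨n, hn, rfl⟩
    rw [Bool.and_eq_true]
    refine ⟨?_, ?_⟩
    · rw [PySem.Str.startswith_eq]
      exact (PySem.Chars.startswith_iff _ _).mpr ⟨n.toList, by simp⟩
    · have hsl : (PySem.Str.slice (c ++ n) (some (PySem.Str.len c)) none).toList = n.toList := by
        simp [PySem.Str.len, PySem.List.slice_from_natCast]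
      have heq : PySem.Str.slice (c ++ n) (some (PySem.Str.len c)) none = n := String.toList_inj.mp hsl
      rw [heq]
      have hm : n ∈ pvNumbersA := (PySem.Set.mem_ofList _ _).mpr hn
      simpa [PySem.Set.contains] using hm

theorem pvMatchA_eq_contains (t : String) :
    pvMatchA t pvColorsA = PySem.Set.contains pvValidCards t := by
  rw [Bool.eq_iff_iff]
  have hcards : PySem.Set.contains pvValidCards t = true ↔
      ∃ c ∈ (["r", "o", "blue", "black"] : List String),
        ∃ n ∈ (PySem.List.pyRange 1 14 1).map PySem.Int.toStr, t = c ++ n := by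
    rw [show (PySem.Set.contains pvValidCards t = true) ↔ t ∈ pvValidCards by simp [PySem.Set.contains]]
    rw [pvValidCards, PySem.Set.mem_ofList]
    simp only [List.mem_flatMap, List.mem_map]
    constructor
    · rintro ⟨c, hc, num, hnum, rfl⟩
      exact ⟨c, hc, PySem.Int.toStr num, ⟨num, hnum, rfl⟩, rfl⟩
    · rintro ⟨c, hc, n, ⟨num, hnum, rfl⟩, rfl⟩
      exact ⟨c, hc, num, hnum, rfl⟩
  have hcol : pvColorsA = ["r", "o", "blue", "black"] := by decide
  rw [hcol, hcards, pvMatchA_cons, pvMatchA_cons, pvMatchA_cons, pvMatchA_cons]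
  simp only [pvMatchA, Bool.or_eq_true, pvColor_iff, List.mem_cons, List.not_mem_nil]
  constructor
  · rintro (h | h | h | h | h)
    · exact ⟨"r", by simp, h⟩
    · exact ⟨"o", by simp, h⟩
    · exact ⟨"blue", by simp, h⟩
    · exact ⟨"black", by simp, h⟩
    · exact absurd h (by simp)
  · rintro ⟨c, hc, hn⟩
    rcases hc with rfl | rfl | rfl | rfl | hc
    · exact Or.inl hn
    · exact Or.inr (Or.inl hn)
    · exact Or.inr (Or.inr (Or.inl hn))
    · exact Or.inr (Or.inr (Or.inr (Or.inl hn)))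
    · exact absurd hc (by simp)

theorem pvLoop_eq (ts : List String) : pvLoopA ts = pvLoopB ts := by
  induction ts with
  | nil => rfl
  | cons t rest ih =>
      simp only [pvLoopA, pvLoopB, pvMatchA_eq_contains]
      cases h : PySem.Set.contains pvValidCards t <;> simp [ih]

-- ===== VERDICT (by name: the statement is the Claim_ definition above) =====
theorem validate_colornumber_input_spec : Claim_equal_validate_colornumber_input := by
  intro s _
  unfold Spec_validate_colornumber_input validate_colornumber_input validate_colornumber_input_alt
  cases h : PySem.Str.split₀ (PySem.Str.replace s "," " ") with
  | nil => simp
  | cons t rest => simp [pvLoop_eq]
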